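-- pv_equiv track=rewrite | github.com/ErikVabu-Personal/aisoc-lab | pixelagents_web/app/server.py | _split_common_and_role
-- ===== SOURCE A (Python) =====
-- def _split_common_and_role(
--     full_by_slug: dict[str, str],
-- ) -> tuple[str, dict[str, str]]:
--     """Find the longest common prefix across all agents' instructions
--     (truncated to a paragraph boundary so we don't split mid-sentence)
--     and return (common_preamble, {slug: role_specific_tail}).
--
--     Falls back gracefully when an agent's instructions are missing or
--     the prefix is degenerate — those agents get their full instructions
--     back as the role tail.
--     """
--     populated = {k: v for k, v in full_by_slug.items() if isinstance(v, str) and v.strip()}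
--     if len(populated) < 2:
--         # Need at least two strings to compute a meaningful common
--         # prefix. Surface whatever we have as role-only.
--         return "", dict(full_by_slug)
--
--     texts = list(populated.values())
--     common = texts[0]
--     for t in texts[1:]:
--         n = min(len(common), len(t))
--         i = 0
--         while i < n and common[i] == t[i]:
--             i += 1
--         common = common[:i]
--
--     # Truncate to the last paragraph boundary so the split lands cleanly
--     # between two markdown blocks rather than mid-line.
--     sep_idx = common.rfind("\n\n")
--     common = common[:sep_idx] if sep_idx > 0 else ""
--     common_clean = common.rstrip("\n")
--
--     roles: dict[str, str] = {}
--     for slug, full in full_by_slug.items():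
--         if common and isinstance(full, str) and full.startswith(common):
--             roles[slug] = full[len(common):].lstrip("\n")
--         else:
--             roles[slug] = full or ""
--     return common_clean, roles
-- ===== SOURCE B (Python) =====
-- def _split_common_and_role(full_by_slug):
--     # Flat list of populated texts (values only); the slugs are not needed for the prefix.
--     texts = [v for v in full_by_slug.values() if isinstance(v, str) and v.strip()]
--     if len(texts) < 2:
--         return "", dict(full_by_slug)
--
--     # Vertical LCP: one index sweep comparing every text's i-th character
--     # against the first text's, instead of A's pairwise prefix reduction.
--     first, rest = texts[0], texts[1:]
--     n = min(len(t) for t in texts)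
--     i = 0
--     while i < n and all(t[i] == first[i] for t in rest):
--         i += 1
--     lcp = first[:i]
--
--     # Branch-free paragraph truncation: rfind == -1 or 0 both clamp to an
--     # empty slice, replacing A's `common[:sep_idx] if sep_idx > 0 else ""`.
--     common = lcp[:max(lcp.rfind("\n\n"), 0)]
--
--     roles = {slug: full[len(common):].lstrip("\n")
--                    if common and full.startswith(common) else (full or "")
--              for slug, full in full_by_slug.items()}
--     return common.rstrip("\n"), roles
-- ===== Notes on version B (the rewrite author's own statement) =====
-- stated objective: alternative
-- what changed: A's shrinking pairwise LCP fold becomes a single vertical index sweep bounded by the minimum length over a flat list of populated values (no intermediate dict), the guarded `common[:sep_idx] if sep_idx > 0 else ""` paragraph cut becomes a branch-free clamped slice `lcp[:max(rfind, 0)]`, and the mutated roles-dict loop becomes a comprehension; the return value is reproduced exactly.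
import Mathlib
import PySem

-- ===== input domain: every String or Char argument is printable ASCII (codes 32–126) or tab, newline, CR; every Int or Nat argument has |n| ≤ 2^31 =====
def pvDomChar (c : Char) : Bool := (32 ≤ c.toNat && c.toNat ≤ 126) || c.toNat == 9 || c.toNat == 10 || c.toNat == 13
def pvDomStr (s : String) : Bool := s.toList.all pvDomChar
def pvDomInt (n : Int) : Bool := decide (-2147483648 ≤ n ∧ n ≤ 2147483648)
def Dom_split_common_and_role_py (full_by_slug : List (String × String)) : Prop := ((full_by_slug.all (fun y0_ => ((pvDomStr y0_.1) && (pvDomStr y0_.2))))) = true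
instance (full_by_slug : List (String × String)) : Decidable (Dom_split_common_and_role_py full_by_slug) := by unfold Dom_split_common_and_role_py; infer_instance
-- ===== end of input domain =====

-- B replaces A's shrinking pairwise-fold LCP with one vertical index sweep over a flat value
-- list, the guarded paragraph cut with a clamped slice, and the roles loop with a
-- comprehension; same return value (alternative decomposition).

-- ===== PORT A =====
-- A's str.rstrip("\n") / str.lstrip("\n"): drop the maximal run of '\n' at that end (exact)
def pvRstripNl (s : List Char) : List Char := (s.reverse.dropWhile (fun c => c == '\n')).reverse
def pvLstripNl (s : List Char) : List Char := s.dropWhile (fun c => c == '\n')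

-- A's inner `while i < n and common[i] == t[i]: i += 1` as the obvious structural recursion
def pvCountEq : List Char → List Char → Nat
  | a :: as, b :: bs => if a = b then pvCountEq as bs + 1 else 0
  | [], _ => 0
  | _ :: _, [] => 0

-- A's `for slug, full in full_by_slug.items(): roles[slug] = …` accumulator loop
def pvRolesA (fbs : List (String × String)) (common : List Char) : List (String × String) :=
  fbs.foldl (fun acc kv =>
    if common ≠ [] ∧ PySem.Chars.startswith kv.2.toList common then
      acc ++ [(kv.1, String.ofList (pvLstripNl (kv.2.toList.drop common.length)))]
    else
      acc ++ [(kv.1, kv.2)]) []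

-- the branch of A after `len(populated) >= 2`
def pvCoreA (fbs populated : List (String × String)) : String × List (String × String) :=
  let texts := populated.map (fun kv => kv.2.toList)
  let common0 := texts.tail.foldl (fun c t => c.take (pvCountEq c t)) (texts.headD [])
  let sepIdx := PySem.Chars.rfind common0 ['\n', '\n']
  let common := if 0 < sepIdx then common0.take sepIdx.toNat else []
  (String.ofList (pvRstripNl common), pvRolesA fbs common)

def split_common_and_role_py (full_by_slug : List (String × String)) : String × (List (String × String)) :=
  if (full_by_slug.filter (fun kv => !(PySem.Str.strip kv.2 == ""))).length < 2 then
    ("", full_by_slug)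
  else
    pvCoreA full_by_slug (full_by_slug.filter (fun kv => !(PySem.Str.strip kv.2 == "")))

-- ===== PORT B =====
-- B's `while i < n and all(t[i] == first[i] for t in rest): i += 1` (fuel = n - i steps left)
def pvScan (first : List Char) (rest : List (List Char)) : Nat → Nat → Nat
  | 0, i => i
  | fuel + 1, i =>
      if rest.all (fun t => t[i]? == first[i]?) then pvScan first rest fuel (i + 1) else i

-- B's `.rstrip("\n")`, computed as the kept length: 0 on an all-'\n' suffix, else one more
def pvKeepLen : List Char → Nat
  | [] => 0
  | c :: rest => if pvKeepLen rest = 0 ∧ c = '\n' then 0 else pvKeepLen rest + 1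

-- B's roles dict comprehension; `full or ""` on a string is the string itself
def pvTailRoles (common : List Char) (fbs : List (String × String)) : List (String × String) :=
  fbs.map (fun kv =>
    (kv.1,
      if common ≠ [] ∧ PySem.Chars.startswith kv.2.toList common then
        String.ofList ((kv.2.toList.drop common.length).dropWhile (fun c => c == '\n'))
      else kv.2))

def pvAltBody (fbs : List (String × String)) (texts : List (List Char)) : String × List (String × String) :=
  let first := texts.headD []
  let n := (PySem.List.min? (texts.map List.length) (fun x => x)).getD 0
  let lcp := first.take (pvScan first texts.tail n 0)
  let common := lcp.take (max (PySem.Chars.rfind lcp ['\n', '\n']) 0).toNat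
  (String.ofList (common.take (pvKeepLen common)), pvTailRoles common fbs)

def split_common_and_role_py_alt (full_by_slug : List (String × String)) : String × (List (String × String)) :=
  let texts := full_by_slug.filterMap
    (fun kv => if PySem.Str.strip kv.2 == "" then none else some kv.2.toList)
  if texts.length < 2 then ("", full_by_slug)
  else pvAltBody full_by_slug texts

-- ===== PRECONDITION & SPEC =====
def Spec_split_common_and_role_py (full_by_slug : List (String × String)) (out : String × (List (String × String))) : Prop := out = split_common_and_role_py_alt full_by_slug
instance (full_by_slug : List (String × String)) (out : String × (List (String × String))) : Decidable (Spec_split_common_and_role_py full_by_slug out) := by unfold Spec_split_common_and_role_py; infer_instance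

-- ===== CLAIM (what is proved, stated in full; the proofs are below) =====
def Claim_equal_split_common_and_role_py : Prop := ∀ (full_by_slug : List (String × String)), Dom_split_common_and_role_py full_by_slug → Spec_split_common_and_role_py full_by_slug (split_common_and_role_py full_by_slug)

-- ===== LEMMAS AND PROOFS =====

theorem pvCountEq_le_left : ∀ a b : List Char, pvCountEq a b ≤ a.length
  | [], _ => by simp [pvCountEq]
  | _ :: _, [] => by simp [pvCountEq]
  | a :: as, b :: bs => by
      simp only [pvCountEq, List.length_cons]
      split_ifs
      · have := pvCountEq_le_left as bs; omega
      · omega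

theorem pvCountEq_le_right : ∀ a b : List Char, pvCountEq a b ≤ b.length
  | [], _ => by simp [pvCountEq]
  | _ :: _, [] => by simp [pvCountEq]
  | a :: as, b :: bs => by
      simp only [pvCountEq, List.length_cons]
      split_ifs
      · have := pvCountEq_le_right as bs; omega
      · omega

theorem pvCountEq_get : ∀ (a b : List Char) (j : Nat), j < pvCountEq a b → a[j]? = b[j]?
  | [], _, _ => by simp [pvCountEq]
  | _ :: _, [], _ => by simp [pvCountEq]
  | a :: as, b :: bs, j => by
      simp only [pvCountEq]
      split_ifs with hab
      · intro hj
        cases j with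
        | zero => simp [hab]
        | succ j => simpa using pvCountEq_get as bs j (by omega)
      · omega

theorem pvCountEq_mismatch : ∀ a b : List Char, pvCountEq a b < a.length → pvCountEq a b < b.length →
    a[pvCountEq a b]? ≠ b[pvCountEq a b]?
  | [], _ => by simp [pvCountEq]
  | _ :: _, [] => by simp [pvCountEq]
  | a :: as, b :: bs => by
      simp only [pvCountEq, List.length_cons]
      split_ifs with hab
      · intro h1 h2
        simpa using pvCountEq_mismatch as bs (by omega) (by omega)
      · intro _ _
        simpa using hab

theorem pvCountEq_take : ∀ (a b : List Char) (k : Nat), pvCountEq (a.take k) b = min k (pvCountEq a b)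
  | [], b, k => by simp [pvCountEq]
  | a :: as, b, 0 => by simp [pvCountEq]
  | a :: as, [], k + 1 => by simp [pvCountEq]
  | a :: as, b :: bs, k + 1 => by
      simp only [List.take_succ_cons, pvCountEq]
      split_ifs with hab
      · have := pvCountEq_take as bs k; omega
      · omega

theorem pvFoldTake (rest : List (List Char)) : ∀ (first : List Char) (m : Nat),
    rest.foldl (fun c t => c.take (pvCountEq c t)) (first.take m)
    = first.take (rest.foldl (fun m t => min m (pvCountEq first t)) m) := by
  induction rest with
  | nil => intro first m; rfl
  | cons t rs ih =>
      intro first m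
      simp only [List.foldl_cons]
      rw [pvCountEq_take, List.take_take]
      rw [show min (min m (pvCountEq first t)) m = min m (pvCountEq first t) by omega]
      exact ih first (min m (pvCountEq first t))

theorem pvFoldMinMono (l : List (List Char)) (f g : List Char → Nat)
    (hfg : ∀ x ∈ l, f x ≤ g x) : ∀ (a b : Nat), a ≤ b →
    l.foldl (fun m x => min m (f x)) a ≤ l.foldl (fun m x => min m (g x)) b := by
  induction l with
  | nil => intro a b hab; simpa using hab
  | cons x xs ih =>
      intro a b hab
      simp only [List.foldl_cons]
      exact ih (fun y hy => hfg y (List.mem_cons_of_mem _ hy)) _ _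
        (by have := hfg x (List.mem_cons_self) ; omega)

theorem pvScan_bounds (first : List Char) (rest : List (List Char)) :
    ∀ (f i : Nat), i ≤ pvScan first rest f i ∧ pvScan first rest f i ≤ i + f := by
  intro f
  induction f with
  | zero => intro i; simp [pvScan]
  | succ f ih =>
      intro i
      have h2 := ih (i + 1)
      rw [pvScan]
      split
      · omega
      · omega

theorem pvScan_all (first : List Char) (rest : List (List Char)) :
    ∀ (f i j : Nat), i ≤ j → j < pvScan first rest f i →
      rest.all (fun t => t[j]? == first[j]?) = true := by
  intro f
  induction f with
  | zero => intro i j h1 h2; simp only [pvScan] at h2; omega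
  | succ f ih =>
      intro i j h1 h2
      simp only [pvScan] at h2
      split_ifs at h2 with hc
      · rcases Nat.eq_or_lt_of_le h1 with rfl | hlt
        · exact hc
        · exact ih (i + 1) j hlt h2
      · omega

theorem pvScan_stop (first : List Char) (rest : List (List Char)) :
    ∀ (f i : Nat), pvScan first rest f i < i + f →
      rest.all (fun t => t[pvScan first rest f i]? == first[pvScan first rest f i]?) = false := by
  intro f
  induction f with
  | zero => intro i h; simp only [pvScan] at h; omega
  | succ f ih =>
      intro i h
      cases hc : rest.all (fun t => t[i]? == first[i]?) with
      | true =>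
          have hred : pvScan first rest (f + 1) i = pvScan first rest f (i + 1) := by
            rw [pvScan]; simp [hc]
          rw [hred] at h ⊢
          exact ih (i + 1) (by omega)
      | false =>
          have hred : pvScan first rest (f + 1) i = i := by
            rw [pvScan]; simp [hc]
          rw [hred] at h ⊢
          exact hc

-- the central fact: A's pairwise LCP fold = B's vertical index sweep
theorem pv_common_eq (first : List Char) (rest : List (List Char)) :
    rest.foldl (fun c t => c.take (pvCountEq c t)) first
    = first.take (pvScan first rest
        ((PySem.List.min? ((first :: rest).map List.length) (fun x => x)).getD 0) 0) := by
  have hmin : (PySem.List.min? ((first :: rest).map List.length) (fun x => x)).getD 0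
      = (rest.map List.length).foldl min first.length := by
    simp [PySem.List.min?_id_cons]
  rw [hmin]
  set n := (rest.map List.length).foldl min first.length with hn
  set M := rest.foldl (fun m t => min m (pvCountEq first t)) first.length with hM
  have hA : rest.foldl (fun c t => c.take (pvCountEq c t)) first = first.take M := by
    conv_lhs => rw [← List.take_length (l := first)]
    exact pvFoldTake rest first first.length
  have hMfold : M = (rest.map (pvCountEq first)).foldl min first.length := by
    rw [hM, List.foldl_map]
  have hn_le := PySem.List.foldl_min_le (rest.map List.length) first.length
  have hM_le : M ≤ first.length ∧ ∀ y ∈ rest.map (pvCountEq first), M ≤ y := by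
    rw [hMfold]; exact PySem.List.foldl_min_le _ _
  have hMn : M ≤ n := by
    rw [hM, hn]
    have h1 : (rest.map List.length).foldl min first.length
        = rest.foldl (fun m t => min m t.length) first.length := by rw [List.foldl_map]
    rw [h1]
    exact pvFoldMinMono rest _ _ (fun x _ => pvCountEq_le_right first x) _ _ le_rfl
  have hSb := pvScan_bounds first rest n 0
  set S := pvScan first rest n 0 with hS
  rcases lt_trichotomy S M with hlt | heq | hgt
  · exfalso
    have hstop := pvScan_stop first rest n 0 (by omega)
    rw [List.all_eq_false] at hstop
    obtain ⟨t, ht, hne⟩ := hstop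
    have : t[S]? = first[S]? := by
      have hSc : S < pvCountEq first t := by
        have := hM_le.2 (pvCountEq first t) (List.mem_map_of_mem ht)
        omega
      exact (pvCountEq_get first t S hSc).symm
    rw [← hS] at hne
    simp [this] at hne
  · rw [hA, heq]
  · exfalso
    have hall := pvScan_all first rest n 0 M (Nat.zero_le _) hgt
    rw [List.all_eq_true] at hall
    have hMfl : M < first.length := by
      have := hn_le.1; omega
    have hmem : M = first.length ∨ M ∈ rest.map (pvCountEq first) := by
      rw [hMfold]; exact PySem.List.foldl_min_mem _ _
    rcases hmem with h | h
    · omega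
    · obtain ⟨t, ht, hMt⟩ := List.mem_map.1 h
      have hMtl : M < t.length := by
        have := hn_le.2 t.length (List.mem_map_of_mem ht)
        omega
      have := pvCountEq_mismatch first t (by omega) (by omega)
      rw [hMt] at this
      have heq' := hall t ht
      simp only [beq_iff_eq] at heq'
      exact this heq'.symm

-- A's guarded paragraph cut = B's clamped slice
theorem pvTrunc_eq (c : List Char) (s : Int) :
    (if 0 < s then c.take s.toNat else []) = c.take (max s 0).toNat := by
  by_cases h : 0 < s
  · simp [h, show max s 0 = s by omega]
  · simp [h, show (max s 0).toNat = 0 by omega]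

theorem pvKeepLen_le : ∀ cs : List Char, pvKeepLen cs ≤ cs.length
  | [] => by simp [pvKeepLen]
  | c :: rest => by
      simp only [pvKeepLen, List.length_cons]
      split_ifs
      · omega
      · have := pvKeepLen_le rest; omega

-- A's reverse-dropWhile-reverse rstrip = B's kept-length take
theorem pvRstrip_eq : ∀ cs : List Char, pvRstripNl cs = cs.take (pvKeepLen cs)
  | [] => rfl
  | c :: rest => by
      have ihr : (rest.reverse.dropWhile (fun c => c == '\n')).reverse = rest.take (pvKeepLen rest) :=
        pvRstrip_eq rest
      simp only [pvRstripNl, List.reverse_cons, List.dropWhile_append]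
      by_cases hnil : List.dropWhile (fun c => c == '\n') rest.reverse = []
      · have hk : pvKeepLen rest = 0 := by
          have ht : rest.take (pvKeepLen rest) = [] := by rw [← ihr, hnil]; rfl
          cases rest with
          | nil => rfl
          | cons x xs =>
              cases h : pvKeepLen (x :: xs) with
              | zero => rfl
              | succ k => rw [h] at ht; simp at ht
        rw [if_pos (by simp [hnil])]
        by_cases hc : c = '\n'
        · simp [List.dropWhile, pvKeepLen, hk, hc]
        · have hcf : (c == '\n') = false := by simp [hc]
          simp [List.dropWhile, hcf, pvKeepLen, hk, hc]
      · rw [if_neg (by simp [hnil])]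
        have hk : pvKeepLen rest ≠ 0 := by
          intro h0
          apply hnil
          have hr := congrArg List.reverse ihr
          simpa [h0] using hr
        rw [List.reverse_append, ihr]
        simp only [pvKeepLen, if_neg (by tauto : ¬(pvKeepLen rest = 0 ∧ c = '\n'))]
        simp [List.take_succ_cons]

-- A's roles accumulator loop = B's comprehension
theorem pvRoles_eq (fbs : List (String × String)) (common : List Char) :
    pvRolesA fbs common = pvTailRoles common fbs := by
  unfold pvRolesA pvTailRoles
  have hfun : (fun (acc : List (String × String)) (kv : String × String) =>
      if common ≠ [] ∧ PySem.Chars.startswith kv.2.toList common then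
        acc ++ [(kv.1, String.ofList (pvLstripNl (kv.2.toList.drop common.length)))]
      else acc ++ [(kv.1, kv.2)])
      = fun acc kv => acc ++ [(kv.1,
          if common ≠ [] ∧ PySem.Chars.startswith kv.2.toList common then
            String.ofList (pvLstripNl (kv.2.toList.drop common.length))
          else kv.2)] := by
    funext acc kv
    split_ifs <;> rfl
  rw [hfun, PySem.List.foldl_append_singleton_eq_map, List.nil_append]
  rfl

-- B's values-only filterMap = A's pair filter followed by the map to texts
theorem pvFilterMap_eq (fbs : List (String × String)) :
    fbs.filterMap (fun kv => if PySem.Str.strip kv.2 == "" then none else some kv.2.toList)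
    = (fbs.filter (fun kv => !(PySem.Str.strip kv.2 == ""))).map (fun kv => kv.2.toList) := by
  induction fbs with
  | nil => rfl
  | cons kv rest ih =>
      simp only [List.filterMap_cons, List.filter_cons]
      by_cases h : PySem.Str.strip kv.2 = ""
      · simp [h]; simpa using ih
      · simp [h]; simpa using ih

theorem pvCore_eq (fbs populated : List (String × String)) (h : populated ≠ []) :
    pvCoreA fbs populated = pvAltBody fbs (populated.map (fun kv => kv.2.toList)) := by
  obtain ⟨p0, ps, rfl⟩ : ∃ p0 ps, populated = p0 :: ps := by
    cases populated with
    | nil => exact absurd rfl h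
    | cons p0 ps => exact ⟨p0, ps, rfl⟩
  simp only [pvCoreA, pvAltBody, List.map_cons, List.headD_cons, List.tail_cons]
  rw [← List.map_cons, pv_common_eq, pvTrunc_eq, pvRstrip_eq, pvRoles_eq]

-- ===== VERDICT (by name: the statement is the Claim_ definition above) =====
theorem split_common_and_role_py_spec : Claim_equal_split_common_and_role_py := by
  intro fbs _hdom
  unfold Spec_split_common_and_role_py split_common_and_role_py split_common_and_role_py_alt
  rw [pvFilterMap_eq]
  simp only [List.length_map]
  by_cases hlen : (fbs.filter (fun kv => !(PySem.Str.strip kv.2 == ""))).length < 2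
  · simp [hlen]
  · simp only [if_neg hlen]
    exact pvCore_eq fbs _ (by
      intro hnil
      rw [hnil] at hlen
      simp at hlen)
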